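-- pv_equiv track=rewrite | github.com/CJSadowitz/draw_game | engine.py | double_int_list
-- ===== SOURCE A (Python) =====
-- int_to_card_dict = {
--
--     1:  "r1",       13: "y1",       25: "g1",       37: "b1",
--     2:  "r2",       14: "y2",       26: "g2",       38: "b2",
--     3:  "r3",       15: "y3",       27: "g3",       39: "b3",
--     4:  "r4",       16: "y4",       28: "g4",       40: "b4",
--     5:  "r5",       17: "y5",       29: "g5",       41: "b5",
--     6:  "r6",       18: "y6",       30: "g6",       42: "b6",
--     7:  "r7",       19: "y7",       31: "g7",       43: "b7",
--     8:  "r8",       20: "y8",       32: "g8",       44: "b8",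
--     9:  "r9",       21: "y9",       33: "g9",       45: "b9",
--     10: "rs",       22: "ys",       34: "gs",       46: "bs",
--     11: "rr",       23: "yr",       35: "gr",       47: "br",
--     12: "rp",       24: "yp",       36: "gp",       48: "bp",
--
--     49: "r1",       61: "y1",       73: "g1",       85: "b1",
--     50: "r2",       62: "y2",       74: "g2",       86: "b2",
--     51: "r3",       63: "y3",       75: "g3",       87: "b3",
--     52: "r4",       64: "y4",       76: "g4",       88: "b4",
--     53: "r5",       65: "y5",       77: "g5",       89: "b5",
--     54: "r6",       66: "y6",       78: "g6",       90: "b6",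
--     55: "r7",       67: "y7",       79: "g7",       91: "b7",
--     56: "r8",       68: "y8",       80: "g8",       92: "b8",
--     57: "r9",       69: "y9",       81: "g9",       93: "b9",
--     58: "rs",       70: "ys",       82: "gs",       94: "bs",
--     59: "rr",       71: "yr",       83: "gr",       95: "br",
--     60: "rp",       72: "yp",       84: "gp",       96: "bp",
--
--     97: "r0",       101: "wc",      105: "wp",
--     98: "y0",       102: "wc",      106: "wp",
--     99: "g0",       103: "wc",      107: "wp",
--     100: "b0",      104: "wc",      108: "wp",
--
--     # Non-holdable cards below
--
--     109: "wcr",     113: "wpr",     117: "wcrq",    121: "wprq",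
--     110: "wcy",     114: "wpy",     118: "wcyq",    122: "wpyq",
--     111: "wcg",     115: "wpg",     119: "wcgq",    123: "wpgq",
--     112: "wcb",     116: "wpb",     120: "wcbq",    124: "wpbq",
--
--     125: "zzz",
--     -1: "non"
--
-- }
--
-- def card(num):                                                      # card(1) = "r1"
--
--     try:
--
--         return int_to_card_dict[num]
--
--     except KeyError:                                                # card(-1) = ""
--
--         return ""
--
-- def double_int_list(int_list):                                      # Sorts a player's cards (as ints) into each color
--
--     double_list = [[], [], [], [], []]                              # r, y, g, b, w
--
--     for num in int_list:
--
--         if card(num)[0] == 'r':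
--
--             double_list[0].append(num)
--
--         elif card(num)[0] == 'y':
--
--             double_list[1].append(num)
--
--         elif card(num)[0] == 'g':
--
--             double_list[2].append(num)
--
--         elif card(num)[0] == 'b':
--
--             double_list[3].append(num)
--
--         elif card(num)[0] == 'w':
--
--             double_list[4].append(num)
--
--     return double_list
-- ===== SOURCE B (Python) =====
-- def _color(num):
--     # Card colors are laid out arithmetically: 1-96 cycle r,y,g,b per block
--     # of 12; 97-100 are the four zero cards r,y,g,b; 101-124 are white.
--     # 125 ("zzz") and -1 ("non") belong to no color bucket.
--     if 1 <= num <= 96: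
--         return "rygb"[((num - 1) // 12) % 4]
--     if 97 <= num <= 100:
--         return "rygb"[num - 97]
--     if 101 <= num <= 124:
--         return "w"
--     return None
--
-- def double_int_list(int_list):
--     # one filtering pass per color, computing the color arithmetically
--     return [[num for num in int_list if _color(num) == c] for c in "rygbw"]
-- ===== Notes on version B (the rewrite author's own statement) =====
-- stated objective: alternative
-- what changed: Replaces A's single loop that dispatches on the first character of a 126-entry dict lookup into five mutable buckets by one filtering comprehension per color whose color is computed arithmetically from the card number (blocks of 12 cycling r,y,g,b; 97-100 zero cards; 101-124 white), with no dict at all.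
-- outside the precondition, e.g. on double_int_list([0]): A raises IndexError, B returns [[], [], [], [], []]
import Mathlib
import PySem

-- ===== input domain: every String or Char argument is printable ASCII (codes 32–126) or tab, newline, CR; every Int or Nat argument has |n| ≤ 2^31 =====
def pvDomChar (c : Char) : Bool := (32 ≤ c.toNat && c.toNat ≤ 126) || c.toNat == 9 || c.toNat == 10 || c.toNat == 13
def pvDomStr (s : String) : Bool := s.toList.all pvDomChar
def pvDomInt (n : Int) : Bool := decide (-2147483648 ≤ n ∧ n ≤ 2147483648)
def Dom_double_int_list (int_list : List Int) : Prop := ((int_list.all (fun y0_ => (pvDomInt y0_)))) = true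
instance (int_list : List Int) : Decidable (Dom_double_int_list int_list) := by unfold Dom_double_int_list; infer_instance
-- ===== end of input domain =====

-- B drops A's 126-entry dict: each color bucket is one filtering pass whose color is computed
-- arithmetically from the card number (alternative decomposition, same cost class).

-- ===== PORT A =====
def int_to_card_dict : PySem.Dict Int String := PySem.Dict.ofList [
  ((1 : Int), "r1"),
  ((13 : Int), "y1"),
  ((25 : Int), "g1"),
  ((37 : Int), "b1"),
  ((2 : Int), "r2"),
  ((14 : Int), "y2"),
  ((26 : Int), "g2"),
  ((38 : Int), "b2"),
  ((3 : Int), "r3"),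
  ((15 : Int), "y3"),
  ((27 : Int), "g3"),
  ((39 : Int), "b3"),
  ((4 : Int), "r4"),
  ((16 : Int), "y4"),
  ((28 : Int), "g4"),
  ((40 : Int), "b4"),
  ((5 : Int), "r5"),
  ((17 : Int), "y5"),
  ((29 : Int), "g5"),
  ((41 : Int), "b5"),
  ((6 : Int), "r6"),
  ((18 : Int), "y6"),
  ((30 : Int), "g6"),
  ((42 : Int), "b6"),
  ((7 : Int), "r7"),
  ((19 : Int), "y7"),
  ((31 : Int), "g7"),
  ((43 : Int), "b7"),
  ((8 : Int), "r8"),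
  ((20 : Int), "y8"),
  ((32 : Int), "g8"),
  ((44 : Int), "b8"),
  ((9 : Int), "r9"),
  ((21 : Int), "y9"),
  ((33 : Int), "g9"),
  ((45 : Int), "b9"),
  ((10 : Int), "rs"),
  ((22 : Int), "ys"),
  ((34 : Int), "gs"),
  ((46 : Int), "bs"),
  ((11 : Int), "rr"),
  ((23 : Int), "yr"),
  ((35 : Int), "gr"),
  ((47 : Int), "br"),
  ((12 : Int), "rp"),
  ((24 : Int), "yp"),
  ((36 : Int), "gp"),
  ((48 : Int), "bp"),
  ((49 : Int), "r1"),
  ((61 : Int), "y1"),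
  ((73 : Int), "g1"),
  ((85 : Int), "b1"),
  ((50 : Int), "r2"),
  ((62 : Int), "y2"),
  ((74 : Int), "g2"),
  ((86 : Int), "b2"),
  ((51 : Int), "r3"),
  ((63 : Int), "y3"),
  ((75 : Int), "g3"),
  ((87 : Int), "b3"),
  ((52 : Int), "r4"),
  ((64 : Int), "y4"),
  ((76 : Int), "g4"),
  ((88 : Int), "b4"),
  ((53 : Int), "r5"),
  ((65 : Int), "y5"),
  ((77 : Int), "g5"),
  ((89 : Int), "b5"),
  ((54 : Int), "r6"),
  ((66 : Int), "y6"),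
  ((78 : Int), "g6"),
  ((90 : Int), "b6"),
  ((55 : Int), "r7"),
  ((67 : Int), "y7"),
  ((79 : Int), "g7"),
  ((91 : Int), "b7"),
  ((56 : Int), "r8"),
  ((68 : Int), "y8"),
  ((80 : Int), "g8"),
  ((92 : Int), "b8"),
  ((57 : Int), "r9"),
  ((69 : Int), "y9"),
  ((81 : Int), "g9"),
  ((93 : Int), "b9"),
  ((58 : Int), "rs"),
  ((70 : Int), "ys"),
  ((82 : Int), "gs"),
  ((94 : Int), "bs"),
  ((59 : Int), "rr"),
  ((71 : Int), "yr"),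
  ((83 : Int), "gr"),
  ((95 : Int), "br"),
  ((60 : Int), "rp"),
  ((72 : Int), "yp"),
  ((84 : Int), "gp"),
  ((96 : Int), "bp"),
  ((97 : Int), "r0"),
  ((101 : Int), "wc"),
  ((105 : Int), "wp"),
  ((98 : Int), "y0"),
  ((102 : Int), "wc"),
  ((106 : Int), "wp"),
  ((99 : Int), "g0"),
  ((103 : Int), "wc"),
  ((107 : Int), "wp"),
  ((100 : Int), "b0"),
  ((104 : Int), "wc"),
  ((108 : Int), "wp"),
  ((109 : Int), "wcr"),
  ((113 : Int), "wpr"),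
  ((117 : Int), "wcrq"),
  ((121 : Int), "wprq"),
  ((110 : Int), "wcy"),
  ((114 : Int), "wpy"),
  ((118 : Int), "wcyq"),
  ((122 : Int), "wpyq"),
  ((111 : Int), "wcg"),
  ((115 : Int), "wpg"),
  ((119 : Int), "wcgq"),
  ((123 : Int), "wpgq"),
  ((112 : Int), "wcb"),
  ((116 : Int), "wpb"),
  ((120 : Int), "wcbq"),
  ((124 : Int), "wpbq"),
  ((125 : Int), "zzz"),
  ((-1 : Int), "non")]

-- card(num): dict lookup, "" on KeyError
def card (num : Int) : String := (int_to_card_dict.get? num).getD ""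

-- one iteration of A's loop: the if/elif chain on card(num)[0], appending to the matching bucket
def pvStepA (acc : List Int × List Int × List Int × List Int × List Int) (num : Int) :
    List Int × List Int × List Int × List Int × List Int :=
  let ⟨r, y, g, b, w⟩ := acc
  if PySem.Str.pyGet? (card num) 0 = some 'r' then (r ++ [num], y, g, b, w)
  else if PySem.Str.pyGet? (card num) 0 = some 'y' then (r, y ++ [num], g, b, w)
  else if PySem.Str.pyGet? (card num) 0 = some 'g' then (r, y, g ++ [num], b, w)
  else if PySem.Str.pyGet? (card num) 0 = some 'b' then (r, y, g, b ++ [num], w)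
  else if PySem.Str.pyGet? (card num) 0 = some 'w' then (r, y, g, b, w ++ [num])
  else (r, y, g, b, w)

def double_int_list (int_list : List Int) : List (List Int) :=
  let acc := int_list.foldl pvStepA ([], [], [], [], [])
  [acc.1, acc.2.1, acc.2.2.1, acc.2.2.2.1, acc.2.2.2.2]

-- ===== PORT B =====
-- _color(num): the card's color computed arithmetically (none = no color bucket)
def pvColor (num : Int) : Option Char :=
  if 1 ≤ num ∧ num ≤ 96 then
    PySem.Str.pyGet? "rygb" (PySem.Int.mod (PySem.Int.floordiv (num - 1) 12) 4)
  else if 97 ≤ num ∧ num ≤ 100 then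
    PySem.Str.pyGet? "rygb" (num - 97)
  else if 101 ≤ num ∧ num ≤ 124 then some 'w'
  else none

def double_int_list_alt (int_list : List Int) : List (List Int) :=
  ("rygbw".toList).map (fun c => int_list.filter (fun num => pvColor num = some c))

-- ===== PRECONDITION & SPEC =====
-- Pre_ excludes exactly the inputs containing an int outside the dict's keys (1..125 or -1):
-- there card(num) = "" and card(num)[0] raises IndexError in A.
def Pre_double_int_list (int_list : List Int) : Prop :=
  ∀ n ∈ int_list, n = -1 ∨ (1 ≤ n ∧ n ≤ 125)
instance (int_list : List Int) : Decidable (Pre_double_int_list int_list) := by unfold Pre_double_int_list; infer_instance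
def pvWitness_double_int_list : List Int := [1, 13, 25, -1, 101, 125, 1]

def Spec_double_int_list (int_list : List Int) (out : List (List Int)) : Prop := out = double_int_list_alt int_list
instance (int_list : List Int) (out : List (List Int)) : Decidable (Spec_double_int_list int_list out) := by unfold Spec_double_int_list; infer_instance

-- ===== CLAIM (what is proved, stated in full; the proofs are below) =====
def Claim_equal_double_int_list : Prop := ∀ (int_list : List Int), Dom_double_int_list int_list → Pre_double_int_list int_list → Spec_double_int_list int_list (double_int_list int_list)

-- ===== LEMMAS AND PROOFS =====

-- A's loop, run from arbitrary buckets, appends to each bucket exactly the matching filter of the input.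
set_option maxRecDepth 8192 in
lemma pvFoldA_eq (l r y g b w : List Int) :
    l.foldl pvStepA (r, y, g, b, w) =
      (r ++ l.filter (fun n => PySem.Str.pyGet? (card n) 0 = some 'r'),
       y ++ l.filter (fun n => PySem.Str.pyGet? (card n) 0 = some 'y'),
       g ++ l.filter (fun n => PySem.Str.pyGet? (card n) 0 = some 'g'),
       b ++ l.filter (fun n => PySem.Str.pyGet? (card n) 0 = some 'b'),
       w ++ l.filter (fun n => PySem.Str.pyGet? (card n) 0 = some 'w')) := by
  induction l generalizing r y g b w with
  | nil => simp
  | cons x xs ih =>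
    simp only [List.foldl_cons]
    by_cases h1 : PySem.List.pyGet? (card x).toList 0 = some 'r'
    · simp [pvStepA, h1, ih]
    · by_cases h2 : PySem.List.pyGet? (card x).toList 0 = some 'y'
      · simp [pvStepA, h2, ih]
      · by_cases h3 : PySem.List.pyGet? (card x).toList 0 = some 'g'
        · simp [pvStepA, h3, ih]
        · by_cases h4 : PySem.List.pyGet? (card x).toList 0 = some 'b'
          · simp [pvStepA, h4, ih]
          · by_cases h5 : PySem.List.pyGet? (card x).toList 0 = some 'w'
            · simp [pvStepA, h5, ih]
            · simp [pvStepA, h1, h2, h3, h4, h5, ih]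

-- on every dict key, the first character of card n agrees with the arithmetic color as a
-- bucket test for each of the five colors (checked exhaustively over the 126 keys)
set_option maxRecDepth 20000 in
lemma pvKeyTable :
    ((-1 :: (List.range 125).map (fun k => Int.ofNat (k + 1))).all (fun n =>
      "rygbw".toList.all (fun c =>
        decide (PySem.Str.pyGet? (card n) 0 = some c) == decide (pvColor n = some c)))) = true := by
  decide

lemma pvCharEq (n : Int) (h : n = -1 ∨ (1 ≤ n ∧ n ≤ 125)) (c : Char) (hc : c ∈ "rygbw".toList) :
    (decide (PySem.Str.pyGet? (card n) 0 = some c)) = (decide (pvColor n = some c)) := by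
  have hmem : n ∈ (-1 :: (List.range 125).map (fun k => Int.ofNat (k + 1))) := by
    rcases h with h | ⟨h1, h2⟩
    · simp [h]
    · right
      show n ∈ (List.range 125).map (fun k => Int.ofNat (k + 1))
      exact List.mem_map.mpr ⟨(n - 1).toNat, List.mem_range.mpr (by omega), by simp [Int.ofNat_eq_natCast]; omega⟩
  have := (List.all_eq_true.mp pvKeyTable) n hmem
  have := (List.all_eq_true.mp this) c hc
  exact beq_iff_eq.mp this

-- ===== VERDICT (by name: the statement is the Claim_ definition above) =====
theorem double_int_list_spec : Claim_equal_double_int_list := by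
  intro l _ hpre
  show _ = _
  simp only [double_int_list, double_int_list_alt, pvFoldA_eq, List.nil_append]
  have key : ∀ c ∈ "rygbw".toList,
      l.filter (fun n => PySem.Str.pyGet? (card n) 0 = some c)
        = l.filter (fun n => pvColor n = some c) := by
    intro c hc
    exact List.filter_congr (fun n hn => pvCharEq n (hpre n hn) c hc)
  simp only [show "rygbw".toList = ['r','y','g','b','w'] from rfl, List.map_cons, List.map_nil]
  rw [key 'r' (by decide), key 'y' (by decide), key 'g' (by decide), key 'b' (by decide),
      key 'w' (by decide)]
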